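-- pv_equiv track=rewrite | github.com/aicx-kr/aicx-callbot | backend/src/application/skill_runtime.py | _find_balanced_json
-- ===== SOURCE A (Python) =====
-- def _find_balanced_json(text: str) -> list[tuple[int, int]]:
--     """텍스트에서 brace-balanced JSON 객체의 (start, end) 위치를 모두 찾는다.
--     `{"tool":"end_call","args":{}}` 같은 중첩 객체도 정확히 매치.
--     """
--     results: list[tuple[int, int]] = []
--     i = 0
--     n = len(text)
--     while i < n:
--         if text[i] != "{":
--             i += 1
--             continue
--         depth = 1
--         j = i + 1
--         in_str = False
--         esc = False
--         while j < n and depth > 0: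
--             ch = text[j]
--             if in_str:
--                 if esc:
--                     esc = False
--                 elif ch == "\\":
--                     esc = True
--                 elif ch == '"':
--                     in_str = False
--             else:
--                 if ch == '"':
--                     in_str = True
--                 elif ch == "{":
--                     depth += 1
--                 elif ch == "}":
--                     depth -= 1
--             j += 1
--         if depth == 0:
--             results.append((i, j))
--             i = j
--         else:
--             break  # 닫히지 않은 객체 → 중단
--     return results
-- ===== SOURCE B (Python) =====
-- def _find_balanced_json(text: str) -> list[tuple[int, int]]:
--     """Single flat pass: one depth counter with in_str/esc flags gated on depth>0."""
--     results: list[tuple[int, int]] = []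
--     depth = 0
--     start = 0
--     in_str = False
--     esc = False
--     for i, ch in enumerate(text):
--         if depth == 0:
--             if ch == "{":
--                 start = i
--                 depth = 1
--                 in_str = False
--                 esc = False
--         else:
--             if in_str:
--                 if esc:
--                     esc = False
--                 elif ch == "\\":
--                     esc = True
--                 elif ch == '"':
--                     in_str = False
--             else:
--                 if ch == '"':
--                     in_str = True
--                 elif ch == "{":
--                     depth += 1
--                 elif ch == "}":
--                     depth -= 1
--                     if depth == 0:
--                         results.append((start, i + 1))
--     return results
-- ===== Notes on version B (the rewrite author's own statement) =====
-- stated objective: simpler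
-- what changed: Replaces A's nested while-loops (outer index scan restarting an inner balanced-brace scan per '{') by a single flat pass over the characters with one persistent state (depth counter, start index, in_str/esc flags), emitting a span whenever depth returns to 0.
import Mathlib
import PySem

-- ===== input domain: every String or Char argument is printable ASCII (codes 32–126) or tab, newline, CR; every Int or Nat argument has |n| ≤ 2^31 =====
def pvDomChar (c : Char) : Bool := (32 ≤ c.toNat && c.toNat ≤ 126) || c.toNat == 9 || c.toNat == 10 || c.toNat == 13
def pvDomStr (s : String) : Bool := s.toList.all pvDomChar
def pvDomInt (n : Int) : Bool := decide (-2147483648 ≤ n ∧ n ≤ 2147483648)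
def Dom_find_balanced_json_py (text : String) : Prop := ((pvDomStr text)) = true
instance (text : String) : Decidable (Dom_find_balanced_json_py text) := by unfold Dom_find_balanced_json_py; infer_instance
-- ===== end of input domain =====

-- B replaces A's nested while-loops (outer scan + inner balanced scan) by a single flat
-- pass with a persistent depth/start/in_str/esc state; objective: simpler one-pass decomposition.

-- ===== PORT A =====
-- inner while-loop of A: consumes chars of the current suffix, returns (chars consumed, final depth)
def innerScanA : List Char → Int → Bool → Bool → Nat × Int
  | [], depth, _, _ => (0, depth)
  | c :: cs, depth, in_str, esc =>
    if depth ≤ 0 then (0, depth)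
    else
      let r :=
        if in_str then
          if esc then innerScanA cs depth true false
          else if c = '\\' then innerScanA cs depth true true
          else if c = '"' then innerScanA cs depth false esc
          else innerScanA cs depth in_str esc
        else
          if c = '"' then innerScanA cs depth true esc
          else if c = '{' then innerScanA cs (depth + 1) in_str esc
          else if c = '}' then innerScanA cs (depth - 1) in_str esc
          else innerScanA cs depth in_str esc
      (r.1 + 1, r.2)

-- outer while-loop of A
def outerScanA : List Char → Int → List (Int × Int)
  | [], _ => []
  | c :: rest, i =>
    if c ≠ '{' then outerScanA rest (i + 1)
    else
      let r := innerScanA rest 1 false false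
      if r.2 = 0 then (i, i + 1 + (r.1 : Int)) :: outerScanA (rest.drop r.1) (i + 1 + (r.1 : Int))
      else []
termination_by cs _ => cs.length
decreasing_by
  all_goals (simp [List.length_drop]; try omega)

def find_balanced_json_py (text : String) : List (Int × Int) :=
  outerScanA text.toList 0

-- ===== PORT B =====
-- the single flat loop of Source B: state = (depth, start, in_str, esc), one char at a time
def flatScanB : List Char → Int → Int → Int → Bool → Bool → List (Int × Int)
  | [], _, _, _, _, _ => []
  | ch :: cs, i, depth, start, in_str, esc =>
    if depth = 0 then
      if ch = '{' then flatScanB cs (i + 1) 1 i false false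
      else flatScanB cs (i + 1) depth start in_str esc
    else
      if in_str then
        if esc then flatScanB cs (i + 1) depth start in_str false
        else if ch = '\\' then flatScanB cs (i + 1) depth start in_str true
        else if ch = '"' then flatScanB cs (i + 1) depth start false esc
        else flatScanB cs (i + 1) depth start in_str esc
      else
        if ch = '"' then flatScanB cs (i + 1) depth start true esc
        else if ch = '{' then flatScanB cs (i + 1) (depth + 1) start in_str esc
        else if ch = '}' then
          if depth - 1 = 0 then (start, i + 1) :: flatScanB cs (i + 1) (depth - 1) start in_str esc
          else flatScanB cs (i + 1) (depth - 1) start in_str esc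
        else flatScanB cs (i + 1) depth start in_str esc

def find_balanced_json_py_alt (text : String) : List (Int × Int) :=
  flatScanB text.toList 0 0 0 false false

-- ===== PRECONDITION & SPEC =====
def Spec_find_balanced_json_py (text : String) (out : List (Int × Int)) : Prop := out = find_balanced_json_py_alt text
instance (text : String) (out : List (Int × Int)) : Decidable (Spec_find_balanced_json_py text out) := by unfold Spec_find_balanced_json_py; infer_instance

-- ===== CLAIM (what is proved, stated in full; the proofs are below) =====
def Claim_equal_find_balanced_json_py : Prop := ∀ (text : String), Dom_find_balanced_json_py text → Spec_find_balanced_json_py text (find_balanced_json_py text)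

-- ===== LEMMAS AND PROOFS =====

-- at depth 0 the flat loop ignores its start/in_str/esc components
theorem flat0_indep : ∀ (cs : List Char) (i s s' : Int) (a a' b b' : Bool),
    flatScanB cs i 0 s a b = flatScanB cs i 0 s' a' b' := by
  intro cs
  induction cs with
  | nil => intros; simp [flatScanB]
  | cons c cs ih =>
    intro i s s' a a' b b'
    by_cases h : c = '{'
    · simp [flatScanB, h]
    · simpa [flatScanB, h] using ih (i + 1) s s' a a' b b'

-- A's inner scan stops immediately once depth is non-positive
theorem inner_stop (cs : List Char) (depth : Int) (a b : Bool) (h : depth ≤ 0) :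
    innerScanA cs depth a b = (0, depth) := by
  cases cs with
  | nil => simp [innerScanA]
  | cons c cs => simp [innerScanA, h]

-- while depth > 0, the flat loop behaves as A's inner scan followed by a depth-0 restart
theorem flat_inner : ∀ (cs : List Char) (j s depth : Int) (in_str esc : Bool),
    0 < depth →
    flatScanB cs j depth s in_str esc =
      (if (innerScanA cs depth in_str esc).2 = 0 then
        (s, j + ((innerScanA cs depth in_str esc).1 : Int)) ::
          flatScanB (cs.drop (innerScanA cs depth in_str esc).1)
            (j + ((innerScanA cs depth in_str esc).1 : Int)) 0 0 false false
       else []) := by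
  intro cs
  induction cs with
  | nil =>
    intro j s depth in_str esc hd
    have h : ¬ (depth = 0) := by omega
    simp [innerScanA, flatScanB, h]
  | cons c cs ih =>
    intro j s depth in_str esc hd
    have hne : ¬ (depth = 0) := by omega
    have hnle : ¬ (depth ≤ 0) := by omega
    cases in_str with
    | true =>
      cases esc with
      | true =>
        -- escaped char consumed
        simp only [flatScanB, innerScanA, hne, hnle, if_true, if_false]
        rw [ih (j + 1) s depth true false hd]
        by_cases hz : (innerScanA cs depth true false).2 = 0
        · simp only [if_pos hz, List.drop_succ_cons]
          push_cast
          ring_nf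
        · simp only [if_neg hz]
      | false =>
        by_cases hbs : c = '\\'
        · -- backslash starts an escape
          simp only [flatScanB, innerScanA, hne, hnle, hbs, if_true, if_false,
            Bool.false_eq_true, Char.reduceEq, reduceIte]
          rw [ih (j + 1) s depth true true hd]
          by_cases hz : (innerScanA cs depth true true).2 = 0
          · simp only [if_pos hz, List.drop_succ_cons]
            push_cast
            ring_nf
          · simp only [if_neg hz]
        · by_cases hq : c = '"'
          · -- closing quote
            simp only [flatScanB, innerScanA, hne, hnle, hbs, hq, if_true, if_false,
              Bool.false_eq_true, Char.reduceEq, reduceIte]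
            rw [ih (j + 1) s depth false false hd]
            by_cases hz : (innerScanA cs depth false false).2 = 0
            · simp only [if_pos hz, List.drop_succ_cons]
              push_cast
              ring_nf
            · simp only [if_neg hz]
          · -- ordinary char inside string
            simp only [flatScanB, innerScanA, hne, hnle, hbs, hq, if_true, if_false,
              Bool.false_eq_true, Char.reduceEq, reduceIte]
            rw [ih (j + 1) s depth true false hd]
            by_cases hz : (innerScanA cs depth true false).2 = 0
            · simp only [if_pos hz, List.drop_succ_cons]
              push_cast
              ring_nf
            · simp only [if_neg hz]
    | false =>
      by_cases hq : c = '"'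
      · -- opening quote
        simp only [flatScanB, innerScanA, hne, hnle, hq, if_true, if_false,
          Bool.false_eq_true, Char.reduceEq, reduceIte]
        rw [ih (j + 1) s depth true esc hd]
        by_cases hz : (innerScanA cs depth true esc).2 = 0
        · simp only [if_pos hz, List.drop_succ_cons]
          push_cast
          ring_nf
        · simp only [if_neg hz]
      · by_cases hob : c = '{'
        · -- nested open brace
          simp only [flatScanB, innerScanA, hne, hnle, hq, hob, if_true, if_false,
            Bool.false_eq_true, Char.reduceEq, reduceIte]
          rw [ih (j + 1) s (depth + 1) false esc (by omega)]
          by_cases hz : (innerScanA cs (depth + 1) false esc).2 = 0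
          · simp only [if_pos hz, List.drop_succ_cons]
            push_cast
            ring_nf
          · simp only [if_neg hz]
        · by_cases hcb : c = '}'
          · by_cases hone : depth - 1 = 0
            · -- this brace closes the object; A's inner scan stops right after it
              have hin : innerScanA cs (depth - 1) false esc = (0, depth - 1) :=
                inner_stop cs (depth - 1) false esc (by omega)
              simp only [flatScanB, innerScanA, hne, hnle, hq, hob, hcb, hone, if_true, if_false,
                Bool.false_eq_true, Char.reduceEq, reduceIte, hin]
              simp only [hone, if_pos rfl, List.drop_succ_cons, List.drop_zero]
              push_cast
              rw [flat0_indep cs (j + 1) s 0 false false esc false,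
                inner_stop cs 0 false esc le_rfl]
              norm_num
            · -- closing brace of a nested object
              simp only [flatScanB, innerScanA, hne, hnle, hq, hob, hcb, hone, if_true, if_false,
                Bool.false_eq_true, Char.reduceEq, reduceIte]
              rw [ih (j + 1) s (depth - 1) false esc (by omega)]
              by_cases hz : (innerScanA cs (depth - 1) false esc).2 = 0
              · simp only [if_pos hz, List.drop_succ_cons]
                push_cast
                ring_nf
              · simp only [if_neg hz]
          · -- ordinary char outside string
            simp only [flatScanB, innerScanA, hne, hnle, hq, hob, hcb, if_true, if_false,
              Bool.false_eq_true, Char.reduceEq, reduceIte]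
            rw [ih (j + 1) s depth false esc hd]
            by_cases hz : (innerScanA cs depth false esc).2 = 0
            · simp only [if_pos hz, List.drop_succ_cons]
              push_cast
              ring_nf
            · simp only [if_neg hz]

theorem outer_flat : ∀ (n : Nat) (cs : List Char), cs.length ≤ n →
    ∀ i : Int, outerScanA cs i = flatScanB cs i 0 0 false false := by
  intro n
  induction n with
  | zero =>
    intro cs hlen i
    cases cs with
    | nil => simp [outerScanA, flatScanB]
    | cons c rest => simp at hlen
  | succ n ih =>
    intro cs hlen i
    cases cs with
    | nil => simp [outerScanA, flatScanB]
    | cons c rest =>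
      by_cases h : c = '{'
      · simp only [outerScanA, flatScanB, h, ne_eq, not_true_eq_false, if_false, if_true,
          eq_self_iff_true, reduceIte]
        rw [flat_inner rest (i + 1) i 1 false false (by omega)]
        by_cases hz : (innerScanA rest 1 false false).2 = 0
        · simp only [if_pos hz]
          have hd : (rest.drop (innerScanA rest 1 false false).1).length ≤ n := by
            have := List.length_drop (l := rest) (i := (innerScanA rest 1 false false).1)
            simp at hlen; omega
          rw [ih _ hd]
        · simp only [if_neg hz]
      · simp only [outerScanA, flatScanB, h, ne_eq, not_false_eq_true, if_true, reduceIte]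
        exact ih rest (by simp at hlen; omega) (i + 1)

-- ===== VERDICT (by name: the statement is the Claim_ definition above) =====
theorem find_balanced_json_py_spec : Claim_equal_find_balanced_json_py := by
  intro text _
  unfold Spec_find_balanced_json_py find_balanced_json_py find_balanced_json_py_alt
  exact outer_flat text.toList.length text.toList le_rfl 0
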